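-- pv_equiv track=rewrite | github.com/houzigegege/DATAanalyte-V2.0 | NMR2D.py | delete_NAN
-- ===== SOURCE A (Python) =====
-- def delete_NAN(Carbon_x,Carbon_y,x_ppm_COSY,y_ppm_COSY):
--     index1=[]
--     index2=[]
--     #删除每一行中值为“NAN”的元素
--     for i in range(len(Carbon_x)):
--         for j in range(len(Carbon_x[i])):
--             if Carbon_x[i][j]=="NAN":
--                 index1.append(i)
--                 index2.append(j)
--     index1.reverse()
--     index2.reverse()
--     for a in range(len(index1)):
--         del Carbon_x[index1[a]][index2[a]]
--         del Carbon_y[index1[a]][index2[a]]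
--         del x_ppm_COSY[index1[a]][index2[a]]
--         del y_ppm_COSY[index1[a]][index2[a]]
--     #删除空的行
--     index3=[]
--     for i in range(len(Carbon_x)):
--         if len(Carbon_x[i])==0:
--             index3.append(i)
--     index3.reverse()
--     for b in range(len(index3)):
--         del Carbon_x[index3[b]]
--         del Carbon_y[index3[b]]
--         del x_ppm_COSY[index3[b]]
--         del y_ppm_COSY[index3[b]]
--     return (Carbon_x,Carbon_y,x_ppm_COSY,y_ppm_COSY)
-- ===== SOURCE B (Python) =====
-- def delete_NAN(Carbon_x, Carbon_y, x_ppm_COSY, y_ppm_COSY):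
--     # per-row set of "NAN" positions in Carbon_x; filter them out of each list by index
--     nans = [{j for j in range(len(row)) if row[j] == "NAN"} for row in Carbon_x]
--     for i in range(len(Carbon_x)):
--         if nans[i]:
--             for L in (Carbon_x, Carbon_y, x_ppm_COSY, y_ppm_COSY):
--                 L[i][:] = [L[i][j] for j in range(len(L[i])) if j not in nans[i]]
--     drop = {i for i in range(len(Carbon_x)) if len(Carbon_x[i]) == 0}
--     if drop:
--         for L in (Carbon_x, Carbon_y, x_ppm_COSY, y_ppm_COSY):
--             L[:] = [L[i] for i in range(len(L)) if i not in drop]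
--     return (Carbon_x, Carbon_y, x_ppm_COSY, y_ppm_COSY)
-- ===== Notes on version B (the rewrite author's own statement) =====
-- stated objective: alternative
-- what changed: Instead of collecting reversed parallel index lists and positionally deleting entries (then rows) with del, B computes per-row sets of NAN positions (and a set of empty-row indices) once and rebuilds each list by a single index-filtering pass, mutating in place via slice assignment.
import Mathlib
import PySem

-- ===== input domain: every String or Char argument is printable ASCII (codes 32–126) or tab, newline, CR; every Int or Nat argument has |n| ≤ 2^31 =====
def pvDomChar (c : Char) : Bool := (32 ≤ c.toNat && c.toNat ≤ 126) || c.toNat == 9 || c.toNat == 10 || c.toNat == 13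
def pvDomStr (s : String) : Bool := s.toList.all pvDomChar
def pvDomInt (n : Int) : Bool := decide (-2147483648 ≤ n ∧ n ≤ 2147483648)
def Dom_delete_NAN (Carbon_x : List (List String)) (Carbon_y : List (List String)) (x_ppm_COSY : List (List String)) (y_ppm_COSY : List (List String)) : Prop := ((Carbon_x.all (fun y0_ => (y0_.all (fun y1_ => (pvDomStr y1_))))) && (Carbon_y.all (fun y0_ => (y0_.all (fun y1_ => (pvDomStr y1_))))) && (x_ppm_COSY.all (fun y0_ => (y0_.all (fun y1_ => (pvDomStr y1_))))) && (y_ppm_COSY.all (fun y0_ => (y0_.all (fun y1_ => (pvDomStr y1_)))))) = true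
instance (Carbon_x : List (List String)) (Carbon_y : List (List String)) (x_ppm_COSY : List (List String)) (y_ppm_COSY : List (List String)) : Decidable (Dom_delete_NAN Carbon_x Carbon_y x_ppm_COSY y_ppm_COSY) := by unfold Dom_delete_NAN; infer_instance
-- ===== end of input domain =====

-- ===== PORT A =====
-- Literal port of A: collect (row,col) indices of "NAN" entries into two parallel
-- lists, reverse them, delete positionally from all four lists, then collect and
-- delete empty-row indices.  (Python A mutates its arguments in place; the
-- equivalence proved here is about the return value only.)
def delete_NAN (Carbon_x : List (List String)) (Carbon_y : List (List String)) (x_ppm_COSY : List (List String)) (y_ppm_COSY : List (List String)) : List (List String) × List (List String) × List (List String) × List (List String) :=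
  let idx : List Nat × List Nat :=
    (List.range Carbon_x.length).foldl (fun acc i =>
      (List.range ((Carbon_x.getD i []).length)).foldl (fun acc2 j =>
        if (Carbon_x.getD i []).getD j "" = "NAN" then (acc2.1 ++ [i], acc2.2 ++ [j]) else acc2) acc)
      ([], [])
  let index1 := idx.1.reverse
  let index2 := idx.2.reverse
  let s :=
    (List.range index1.length).foldl (fun (s : List (List String) × List (List String) × List (List String) × List (List String)) a =>
      (s.1.modify (index1.getD a 0) (fun r => r.eraseIdx (index2.getD a 0)),
       s.2.1.modify (index1.getD a 0) (fun r => r.eraseIdx (index2.getD a 0)),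
       s.2.2.1.modify (index1.getD a 0) (fun r => r.eraseIdx (index2.getD a 0)),
       s.2.2.2.modify (index1.getD a 0) (fun r => r.eraseIdx (index2.getD a 0))))
      (Carbon_x, Carbon_y, x_ppm_COSY, y_ppm_COSY)
  let index3 :=
    ((List.range s.1.length).foldl (fun acc i =>
      if (s.1.getD i []).length = 0 then acc ++ [i] else acc) []).reverse
  (List.range index3.length).foldl (fun (t : List (List String) × List (List String) × List (List String) × List (List String)) b =>
      (t.1.eraseIdx (index3.getD b 0),
       t.2.1.eraseIdx (index3.getD b 0),
       t.2.2.1.eraseIdx (index3.getD b 0),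
       t.2.2.2.eraseIdx (index3.getD b 0)))
    s

-- ===== PORT B =====
-- B: per-row set of NAN positions in Carbon_x (and a set of empty-row indices),
-- each list rebuilt by one index-filtering pass.  (Both Pythons mutate their
-- arguments in place; the equivalence proved here is about the return value.)
def nanSetOf (row : List String) : PySem.Set Nat :=
  PySem.Set.ofList ((List.range row.length).filter (fun j => decide (row.getD j "" = "NAN")))

def keepRow (nan : PySem.Set Nat) (row : List String) : List String :=
  ((List.range row.length).filter (fun j => !PySem.Set.contains nan j)).map (fun j => row.getD j "")

def delete_NAN_alt (Carbon_x : List (List String)) (Carbon_y : List (List String)) (x_ppm_COSY : List (List String)) (y_ppm_COSY : List (List String)) : List (List String) × List (List String) × List (List String) × List (List String) :=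
  let nans := Carbon_x.map nanSetOf
  let t := (List.range Carbon_x.length).foldl
    (fun (t : List (List String) × List (List String) × List (List String) × List (List String)) i =>
      if nans.getD i [] ≠ [] then
        (t.1.modify i (keepRow (nans.getD i [])),
         t.2.1.modify i (keepRow (nans.getD i [])),
         t.2.2.1.modify i (keepRow (nans.getD i [])),
         t.2.2.2.modify i (keepRow (nans.getD i [])))
      else t)
    (Carbon_x, Carbon_y, x_ppm_COSY, y_ppm_COSY)
  let drop := PySem.Set.ofList ((List.range t.1.length).filter (fun i => decide ((t.1.getD i []).length = 0)))
  if drop ≠ [] then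
    (((List.range t.1.length).filter (fun i => !PySem.Set.contains drop i)).map (fun i => t.1.getD i []),
     ((List.range t.2.1.length).filter (fun i => !PySem.Set.contains drop i)).map (fun i => t.2.1.getD i []),
     ((List.range t.2.2.1.length).filter (fun i => !PySem.Set.contains drop i)).map (fun i => t.2.2.1.getD i []),
     ((List.range t.2.2.2.length).filter (fun i => !PySem.Set.contains drop i)).map (fun i => t.2.2.2.getD i []))
  else t

-- ===== PRECONDITION & SPEC =====
-- Pre_ is exactly the inputs on which Python A returns: every "NAN" position of
-- Carbon_x must be positionally deletable from the three parallel lists, and every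
-- all-"NAN" (hence emptied) row index must be a valid row index of each of them;
-- otherwise A raises IndexError.
def Pre_delete_NAN (Carbon_x : List (List String)) (Carbon_y : List (List String)) (x_ppm_COSY : List (List String)) (y_ppm_COSY : List (List String)) : Prop :=
  (∀ i < Carbon_x.length, ∀ j < (Carbon_x.getD i []).length,
      (Carbon_x.getD i []).getD j "" = "NAN" →
      (i < Carbon_y.length ∧ j < (Carbon_y.getD i []).length ∧
       i < x_ppm_COSY.length ∧ j < (x_ppm_COSY.getD i []).length ∧
       i < y_ppm_COSY.length ∧ j < (y_ppm_COSY.getD i []).length)) ∧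
  (∀ i < Carbon_x.length, (∀ v ∈ Carbon_x.getD i [], v = "NAN") →
      (i < Carbon_y.length ∧ i < x_ppm_COSY.length ∧ i < y_ppm_COSY.length))

instance (Carbon_x : List (List String)) (Carbon_y : List (List String)) (x_ppm_COSY : List (List String)) (y_ppm_COSY : List (List String)) : Decidable (Pre_delete_NAN Carbon_x Carbon_y x_ppm_COSY y_ppm_COSY) := by unfold Pre_delete_NAN; exact instDecidableAnd (dp := inferInstance) (dq := inferInstance)

def pvWitness_delete_NAN : List (List String) × List (List String) × List (List String) × List (List String) :=
  ([["NAN", "1.5"], ["2.0"], ["NAN"]],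
   [["7.1", "7.2"], ["7.3"], ["7.4"]],
   [["a", "b"], ["c"], ["d"]],
   [["d", "e"], ["f"], ["g"]])

def Spec_delete_NAN (Carbon_x : List (List String)) (Carbon_y : List (List String)) (x_ppm_COSY : List (List String)) (y_ppm_COSY : List (List String)) (out : List (List String) × List (List String) × List (List String) × List (List String)) : Prop := out = delete_NAN_alt Carbon_x Carbon_y x_ppm_COSY y_ppm_COSY
instance (Carbon_x : List (List String)) (Carbon_y : List (List String)) (x_ppm_COSY : List (List String)) (y_ppm_COSY : List (List String)) (out : List (List String) × List (List String) × List (List String) × List (List String)) : Decidable (Spec_delete_NAN Carbon_x Carbon_y x_ppm_COSY y_ppm_COSY out) := by unfold Spec_delete_NAN; infer_instance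

-- ===== CLAIM (what is proved, stated in full; the proofs are below) =====
def Claim_equal_delete_NAN : Prop := ∀ (Carbon_x : List (List String)) (Carbon_y : List (List String)) (x_ppm_COSY : List (List String)) (y_ppm_COSY : List (List String)), Dom_delete_NAN Carbon_x Carbon_y x_ppm_COSY y_ppm_COSY → Pre_delete_NAN Carbon_x Carbon_y x_ppm_COSY y_ppm_COSY → Spec_delete_NAN Carbon_x Carbon_y x_ppm_COSY y_ppm_COSY (delete_NAN Carbon_x Carbon_y x_ppm_COSY y_ppm_COSY)

-- ===== LEMMAS AND PROOFS =====

-- a loop appending to two accumulators in lockstep under a test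
theorem foldl_pair_append_if {a : Type} (p : a -> Prop) [DecidablePred p] (f g : a -> Nat) (l : List a) (A B : List Nat) :
    l.foldl (fun acc x => if p x then (acc.1 ++ [f x], acc.2 ++ [g x]) else acc) (A, B)
      = (A ++ (l.filter (fun x => decide (p x))).map f, B ++ (l.filter (fun x => decide (p x))).map g) := by
  induction l generalizing A B with
  | nil => simp
  | cons c l ih =>
    by_cases h : p c <;> simp [h, ih]

-- a loop appending block results to two accumulators
theorem foldl_pair_append {a : Type} (F G : a -> List Nat) (l : List a) (A B : List Nat) :
    l.foldl (fun acc x => (acc.1 ++ F x, acc.2 ++ G x)) (A, B)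
      = (A ++ l.flatMap F, B ++ l.flatMap G) := by
  induction l generalizing A B with
  | nil => simp
  | cons c l ih => simp [ih]

-- a 'for a in range(len(u))' loop reading u[a] and v[a] is a fold over the zip
theorem foldl_range_getD2 {b : Type} (u v : List Nat) (h : v.length = u.length)
    (step : b -> Nat -> Nat -> b) (init : b) :
    (List.range u.length).foldl (fun s a => step s (u.getD a 0) (v.getD a 0)) init
      = (u.zip v).foldl (fun s q => step s q.1 q.2) init := by
  induction u generalizing v init with
  | nil => simp
  | cons c u ih =>
    cases v with
    | nil => simp at h
    | cons d v =>
      simp only [List.length_cons, List.range_succ_eq_map, List.foldl_cons, List.foldl_map,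
        List.getD_cons_zero, List.getD_cons_succ, List.zip_cons_cons, Nat.succ_eq_add_one]
      exact ih v (by simpa using h) _

-- single-list version, for the empty-row deletion loop
theorem foldl_range_getD1 {b : Type} (u : List Nat) (step : b -> Nat -> b) (init : b) :
    (List.range u.length).foldl (fun s a => step s (u.getD a 0)) init = u.foldl step init := by
  induction u generalizing init with
  | nil => simp
  | cons c u ih =>
    simp only [List.length_cons, List.range_succ_eq_map, List.foldl_cons, List.foldl_map,
      List.getD_cons_zero, List.getD_cons_succ, Nat.succ_eq_add_one]
    exact ih _

-- a fold over a 4-tuple whose step acts componentwise is four folds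
theorem foldl_prod4 {a b1 b2 b3 b4 : Type} (f1 : b1 -> a -> b1) (f2 : b2 -> a -> b2)
    (f3 : b3 -> a -> b3) (f4 : b4 -> a -> b4) (l : List a) (x : b1) (y : b2) (z : b3) (w : b4) :
    l.foldl (fun s e => (f1 s.1 e, f2 s.2.1 e, f3 s.2.2.1 e, f4 s.2.2.2 e)) (x, y, z, w)
      = (l.foldl f1 x, l.foldl f2 y, l.foldl f3 z, l.foldl f4 w) := by
  induction l generalizing x y z w with
  | nil => rfl
  | cons c l ih => simp [ih]

-- successive modifies at the same index collapse into one
theorem foldl_modify_collapse {a : Type} (i : Nat) (F : Nat -> a -> a) (L : List Nat) (xs : List a) :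
    L.foldl (fun ys j => ys.modify i (F j)) xs
      = xs.modify i (fun r => L.foldl (fun r j => F j r) r) := by
  induction L generalizing xs with
  | nil => simp only [List.foldl_nil]; exact (List.modify_id i xs).symm
  | cons c L ih => simp [ih, List.modify_modify_eq, Function.comp_def]

theorem getD_modify {a : Type} (xs : List a) (i j : Nat) (f : a -> a) (d : a) (hj : j < xs.length) :
    (xs.modify i f).getD j d = if i = j then f (xs.getD j d) else xs.getD j d := by
  simp only [List.getD]
  rw [List.getElem?_modify, List.getElem?_eq_getElem hj]
  split <;> simp

theorem eq_range_map_getD {a : Type} (xs : List a) (d : a) :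
    xs = (List.range xs.length).map (fun i => xs.getD i d) := by
  apply List.ext_getElem
  · simp
  · intro i h1 h2
    simp only [List.getElem_map, List.getElem_range]
    rw [List.getD_eq_getElem xs d h1]

-- a fold of modifies at pairwise-distinct indices, pointwise
theorem foldl_modify_nodup {a : Type} (d : a) (G : Nat -> a -> a) (L : List Nat)
    (hnd : L.Nodup) (xs : List a) :
    L.foldl (fun ys i => ys.modify i (G i)) xs
      = (List.range xs.length).map (fun i => if i ∈ L then G i (xs.getD i d) else xs.getD i d) := by
  induction L generalizing xs with
  | nil => simpa using eq_range_map_getD xs d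
  | cons c L ih =>
    have hc : c ∉ L := (List.nodup_cons.mp hnd).1
    have hnd' : L.Nodup := (List.nodup_cons.mp hnd).2
    simp only [List.foldl_cons]
    rw [ih hnd' (xs.modify c (G c)), List.length_modify]
    apply List.map_congr_left
    intro i hi
    have hilen : i < xs.length := List.mem_range.mp hi
    rw [getD_modify xs c i (G c) d hilen]
    by_cases hic : i = c
    · subst hic
      simp [hc]
    · have hic' : ¬ c = i := fun h => hic h.symm
      simp [List.mem_cons, hic, hic']

-- erasing anything from [] leaves []
theorem foldl_erase_nil {b : Type} (L : List Nat) :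
    L.foldl (fun (t : List b) j => t.eraseIdx j) [] = [] := by
  induction L with
  | nil => rfl
  | cons c L ih => simpa [List.eraseIdx_nil] using ih

-- peeling the head off: erasing shifted positions never touches the head
theorem foldl_erase_map_succ {b : Type} (e : b) :
    ∀ (L : List Nat) (t : List b),
    ((L.map Nat.succ).reverse).foldl (fun t j => t.eraseIdx j) (e :: t)
      = e :: (L.reverse.foldl (fun t j => t.eraseIdx j) t) := by
  intro L
  induction L with
  | nil => intro t; simp
  | cons m L ihL =>
    intro t
    simp only [List.map_cons, List.reverse_cons, List.foldl_append, List.foldl_cons,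
      List.foldl_nil, ihL, Nat.succ_eq_add_one, List.eraseIdx_cons_succ]

-- deleting a descending position list (out-of-range deletes are no-ops) is
-- keeping exactly the in-range positions where the test fails
theorem erase_desc {b : Type} (dB : b) :
    ∀ (s : List b) (n : Nat) (q : Nat -> Bool),
    (((List.range n).filter q).reverse).foldl (fun t j => t.eraseIdx j) s
      = ((List.range s.length).filter (fun j => !(decide (j < n) && q j))).map (fun j => s.getD j dB) := by
  intro s
  induction s with
  | nil => intro n q; rw [foldl_erase_nil]; simp
  | cons e t ih =>
    intro n q
    cases n with
    | zero =>
      have hpred : (fun j => !(decide (j < 0) && q j)) = fun _ => true := by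
        funext j; simp
      simp only [List.range_zero, List.filter_nil, List.reverse_nil, List.foldl_nil, hpred,
        List.filter_true]
      exact eq_range_map_getD (e :: t) dB
    | succ m =>
      have hcomp : ((fun j => q j) ∘ Nat.succ) = (fun j => q (j + 1)) := by
        funext j; simp
      have hcomp2 : ((fun j => !(decide (j < m + 1) && q j)) ∘ Nat.succ)
          = (fun j => !(decide (j < m) && q (j + 1))) := by
        funext j; simp
      simp only [List.length_cons, List.range_succ_eq_map]
      by_cases h0 : q 0
      · rw [List.filter_cons_of_pos h0, List.filter_cons_of_neg (by simp [h0]),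
            List.filter_map, List.filter_map, hcomp, hcomp2,
            List.reverse_cons, List.foldl_append, foldl_erase_map_succ]
        simp only [List.foldl_cons, List.foldl_nil, List.eraseIdx_cons_zero]
        rw [ih m (fun j => q (j + 1)), List.map_map]
        apply List.map_congr_left
        intro j _
        simp
      · rw [List.filter_cons_of_neg (by simpa using h0), List.filter_cons_of_pos (by simp [h0]),
            List.filter_map, List.filter_map, hcomp, hcomp2, foldl_erase_map_succ]
        rw [ih m (fun j => q (j + 1))]
        simp [List.map_map, Function.comp_def]

-- membership in a set built from a filtered range
theorem contains_ofList_filter_range (p : Nat -> Bool) (n j : Nat) :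
    PySem.Set.contains (PySem.Set.ofList ((List.range n).filter p)) j = (decide (j < n) && p j) := by
  have h : PySem.Set.contains (PySem.Set.ofList ((List.range n).filter p)) j
      = decide (j ∈ (List.range n).filter p) := by
    simp [PySem.Set.contains, PySem.Set.mem_ofList]
  rw [h]
  simp [List.mem_filter, List.mem_range]

-- the nan positions of Carbon_x's row i, and the collected (row, col) pairs
def nanPos (row : List String) : List Nat :=
  (List.range row.length).filter (fun j => decide (row.getD j "" = "NAN"))

def pairsOf (Cx : List (List String)) : List (Nat × Nat) :=
  (List.range Cx.length).flatMap (fun i => (nanPos (Cx.getD i [])).map (fun j => (i, j)))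

-- common normal forms the two phase results are brought to
def keepA (Cx : List (List String)) (i : Nat) (row : List String) : List String :=
  ((List.range row.length).filter (fun j =>
    !(decide (j < (Cx.getD i []).length) && decide ((Cx.getD i []).getD j "" = "NAN")))).map
    (fun j => row.getD j "")

def norm1 (Cx L : List (List String)) : List (List String) :=
  (List.range L.length).map (fun i => if i < Cx.length then keepA Cx i (L.getD i []) else L.getD i [])

def fin2 (cx L : List (List String)) : List (List String) :=
  ((List.range L.length).filter (fun i =>
    !(decide (i < cx.length) && decide ((cx.getD i []).length = 0)))).map (fun i => L.getD i [])

theorem keepRow_eq_keepA (Cx : List (List String)) (i : Nat) (row : List String) :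
    keepRow (nanSetOf (Cx.getD i [])) row = keepA Cx i row := by
  unfold keepRow keepA nanSetOf
  congr 1
  apply List.filter_congr
  intro j _
  rw [contains_ofList_filter_range]

theorem keepRow_nil (row : List String) : keepRow ([] : PySem.Set Nat) row = row := by
  unfold keepRow
  have h : ∀ j : Nat, PySem.Set.contains ([] : PySem.Set Nat) j = false := by
    intro j; simp [PySem.Set.contains]
  simp only [h, Bool.not_false, List.filter_true]
  exact (eq_range_map_getD row "").symm

-- the collection loops of A build exactly the nan-position pairs, componentwise
theorem collect_eq (Cx : List (List String)) :
    (List.range Cx.length).foldl (fun acc i =>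
      (List.range ((Cx.getD i []).length)).foldl (fun acc2 j =>
        if (Cx.getD i []).getD j "" = "NAN" then (acc2.1 ++ [i], acc2.2 ++ [j]) else acc2) acc)
      (([] : List Nat), ([] : List Nat))
      = ((pairsOf Cx).map Prod.fst, (pairsOf Cx).map Prod.snd) := by
  have hstep : ∀ (acc : List Nat × List Nat) (i : Nat), i ∈ List.range Cx.length →
      (List.range ((Cx.getD i []).length)).foldl (fun acc2 j =>
        if (Cx.getD i []).getD j "" = "NAN" then (acc2.1 ++ [i], acc2.2 ++ [j]) else acc2) acc
      = (acc.1 ++ (nanPos (Cx.getD i [])).map (fun _ => i),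
         acc.2 ++ (nanPos (Cx.getD i [])).map (fun j => j)) := by
    intro acc i _
    have := foldl_pair_append_if (p := fun j => (Cx.getD i []).getD j "" = "NAN")
      (fun _ => i) (fun j => j) (List.range ((Cx.getD i []).length)) acc.1 acc.2
    simpa [nanPos] using this
  refine Eq.trans (PySem.List.foldl_congr_mem (List.range Cx.length) _
    (fun acc i => (acc.1 ++ (nanPos (Cx.getD i [])).map (fun _ => i),
                   acc.2 ++ (nanPos (Cx.getD i [])).map (fun j => j))) ([], []) hstep) ?_
  rw [foldl_pair_append (fun i => (nanPos (Cx.getD i [])).map (fun _ => i))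
        (fun i => (nanPos (Cx.getD i [])).map (fun j => j)) (List.range Cx.length) [] []]
  simp [pairsOf, List.map_flatMap, List.map_map, Function.comp_def]

-- phase 1 of A, one component: the modify-fold over the reversed pairs
theorem phase1_component (Cx : List (List String)) (s : List (List String)) :
    ((pairsOf Cx).reverse).foldl
        (fun ys q => ys.modify q.1 (fun r => r.eraseIdx q.2)) s
      = norm1 Cx s := by
  unfold pairsOf
  rw [List.reverse_flatMap, List.foldl_flatMap]
  have hstep : ∀ (ys : List (List String)), ∀ i ∈ (List.range Cx.length).reverse,
      ((List.reverse ∘ fun i => (nanPos (Cx.getD i [])).map (fun j => (i, j))) i).foldl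
          (fun ys q => ys.modify q.1 (fun r => r.eraseIdx q.2)) ys
        = ys.modify i (fun r => ((nanPos (Cx.getD i [])).reverse).foldl (fun r j => r.eraseIdx j) r) := by
    intro ys i _
    simp only [Function.comp_apply, ← List.map_reverse, List.foldl_map]
    exact foldl_modify_collapse i (fun j r => r.eraseIdx j) _ ys
  rw [PySem.List.foldl_congr_mem ((List.range Cx.length).reverse) _
    (fun ys i => ys.modify i
      (fun r => ((nanPos (Cx.getD i [])).reverse).foldl (fun r j => r.eraseIdx j) r)) s hstep]
  rw [foldl_modify_nodup []
    (fun i => fun r => ((nanPos (Cx.getD i [])).reverse).foldl (fun r j => r.eraseIdx j) r)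
    _ (List.nodup_reverse.mpr List.nodup_range) s]
  unfold norm1
  apply List.map_congr_left
  intro i _
  simp only [List.mem_reverse, List.mem_range]
  have hEq : ((nanPos (Cx.getD i [])).reverse).foldl (fun r j => r.eraseIdx j) (s.getD i [])
      = keepA Cx i (s.getD i []) := by
    unfold nanPos keepA
    exact erase_desc "" (s.getD i []) ((Cx.getD i []).length)
      (fun j => decide ((Cx.getD i []).getD j "" = "NAN"))
  rw [hEq]

-- phase 1 of A, all four components, in the exact shape of the port
theorem phase1_eq (Cx Cy Xp Yp : List (List String)) :
    (List.range (((pairsOf Cx).map Prod.fst).reverse.length)).foldl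
      (fun (s : List (List String) × List (List String) × List (List String) × List (List String)) a =>
        (s.1.modify ((((pairsOf Cx).map Prod.fst).reverse).getD a 0)
            (fun r => r.eraseIdx ((((pairsOf Cx).map Prod.snd).reverse).getD a 0)),
         s.2.1.modify ((((pairsOf Cx).map Prod.fst).reverse).getD a 0)
            (fun r => r.eraseIdx ((((pairsOf Cx).map Prod.snd).reverse).getD a 0)),
         s.2.2.1.modify ((((pairsOf Cx).map Prod.fst).reverse).getD a 0)
            (fun r => r.eraseIdx ((((pairsOf Cx).map Prod.snd).reverse).getD a 0)),
         s.2.2.2.modify ((((pairsOf Cx).map Prod.fst).reverse).getD a 0)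
            (fun r => r.eraseIdx ((((pairsOf Cx).map Prod.snd).reverse).getD a 0))))
      (Cx, Cy, Xp, Yp)
    = (norm1 Cx Cx, norm1 Cx Cy, norm1 Cx Xp, norm1 Cx Yp) := by
  have hzip : (((pairsOf Cx).map Prod.fst).reverse).zip (((pairsOf Cx).map Prod.snd).reverse)
      = (pairsOf Cx).reverse := by
    rw [← List.map_reverse, ← List.map_reverse, List.zip_map']
    simp
  calc _ = ((((pairsOf Cx).map Prod.fst).reverse).zip (((pairsOf Cx).map Prod.snd).reverse)).foldl
        (fun (s : List (List String) × List (List String) × List (List String) × List (List String)) q =>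
          (s.1.modify q.1 (fun r => r.eraseIdx q.2),
           s.2.1.modify q.1 (fun r => r.eraseIdx q.2),
           s.2.2.1.modify q.1 (fun r => r.eraseIdx q.2),
           s.2.2.2.modify q.1 (fun r => r.eraseIdx q.2))) (Cx, Cy, Xp, Yp) :=
      foldl_range_getD2 (((pairsOf Cx).map Prod.fst).reverse) (((pairsOf Cx).map Prod.snd).reverse)
        (by simp)
        (fun s i j => (s.1.modify i (fun r => r.eraseIdx j), s.2.1.modify i (fun r => r.eraseIdx j),
          s.2.2.1.modify i (fun r => r.eraseIdx j), s.2.2.2.modify i (fun r => r.eraseIdx j)))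
        (Cx, Cy, Xp, Yp)
    _ = ((pairsOf Cx).reverse).foldl
        (fun (s : List (List String) × List (List String) × List (List String) × List (List String)) q =>
          (s.1.modify q.1 (fun r => r.eraseIdx q.2),
           s.2.1.modify q.1 (fun r => r.eraseIdx q.2),
           s.2.2.1.modify q.1 (fun r => r.eraseIdx q.2),
           s.2.2.2.modify q.1 (fun r => r.eraseIdx q.2))) (Cx, Cy, Xp, Yp) := by rw [hzip]
    _ = (((pairsOf Cx).reverse).foldl (fun X q => X.modify q.1 (fun r => r.eraseIdx q.2)) Cx,
         ((pairsOf Cx).reverse).foldl (fun X q => X.modify q.1 (fun r => r.eraseIdx q.2)) Cy,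
         ((pairsOf Cx).reverse).foldl (fun X q => X.modify q.1 (fun r => r.eraseIdx q.2)) Xp,
         ((pairsOf Cx).reverse).foldl (fun X q => X.modify q.1 (fun r => r.eraseIdx q.2)) Yp) :=
      foldl_prod4 (fun X q => X.modify q.1 (fun r => r.eraseIdx q.2))
        (fun X q => X.modify q.1 (fun r => r.eraseIdx q.2))
        (fun X q => X.modify q.1 (fun r => r.eraseIdx q.2))
        (fun X q => X.modify q.1 (fun r => r.eraseIdx q.2))
        ((pairsOf Cx).reverse) Cx Cy Xp Yp
    _ = _ := by
      rw [phase1_component Cx Cx, phase1_component Cx Cy,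
          phase1_component Cx Xp, phase1_component Cx Yp]

-- phase 1 of B, in the exact shape of the port
theorem alt_phase1_eq (Cx Cy Xp Yp : List (List String)) :
    (List.range Cx.length).foldl
      (fun (t : List (List String) × List (List String) × List (List String) × List (List String)) i =>
        if (Cx.map nanSetOf).getD i [] ≠ [] then
          (t.1.modify i (keepRow ((Cx.map nanSetOf).getD i [])),
           t.2.1.modify i (keepRow ((Cx.map nanSetOf).getD i [])),
           t.2.2.1.modify i (keepRow ((Cx.map nanSetOf).getD i [])),
           t.2.2.2.modify i (keepRow ((Cx.map nanSetOf).getD i [])))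
        else t)
      (Cx, Cy, Xp, Yp)
    = (norm1 Cx Cx, norm1 Cx Cy, norm1 Cx Xp, norm1 Cx Yp) := by
  have hgetD : ∀ i : Nat, (Cx.map nanSetOf).getD i [] = nanSetOf (Cx.getD i []) := by
    intro i
    rw [show ([] : PySem.Set Nat) = nanSetOf [] from rfl]
    exact List.getD_map (n := i) Cx [] nanSetOf
  have hmodnil : ∀ (L : List (List String)) (i : Nat),
      L.modify i (keepRow ([] : PySem.Set Nat)) = L := by
    intro L i
    calc L.modify i (keepRow ([] : PySem.Set Nat))
        = L.modify i (fun row => row) := by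
          congr 1
          exact funext keepRow_nil
      _ = L := List.modify_id i L
  have hstep : ∀ (t : List (List String) × List (List String) × List (List String) × List (List String)),
      ∀ i ∈ List.range Cx.length,
      (if (Cx.map nanSetOf).getD i [] ≠ [] then
          (t.1.modify i (keepRow ((Cx.map nanSetOf).getD i [])),
           t.2.1.modify i (keepRow ((Cx.map nanSetOf).getD i [])),
           t.2.2.1.modify i (keepRow ((Cx.map nanSetOf).getD i [])),
           t.2.2.2.modify i (keepRow ((Cx.map nanSetOf).getD i [])))
        else t)
      = (t.1.modify i (keepRow (nanSetOf (Cx.getD i []))),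
         t.2.1.modify i (keepRow (nanSetOf (Cx.getD i []))),
         t.2.2.1.modify i (keepRow (nanSetOf (Cx.getD i []))),
         t.2.2.2.modify i (keepRow (nanSetOf (Cx.getD i [])))) := by
    intro t i _
    rw [hgetD i]
    by_cases h : nanSetOf (Cx.getD i []) = []
    · rw [if_neg (not_not_intro h), h, hmodnil, hmodnil, hmodnil, hmodnil]
    · rw [if_pos h]
  rw [PySem.List.foldl_congr_mem (List.range Cx.length) _
    (fun t i =>
      (t.1.modify i (keepRow (nanSetOf (Cx.getD i []))),
       t.2.1.modify i (keepRow (nanSetOf (Cx.getD i []))),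
       t.2.2.1.modify i (keepRow (nanSetOf (Cx.getD i []))),
       t.2.2.2.modify i (keepRow (nanSetOf (Cx.getD i []))))) (Cx, Cy, Xp, Yp) hstep]
  rw [foldl_prod4 (fun X i => X.modify i (keepRow (nanSetOf (Cx.getD i []))))
    (fun X i => X.modify i (keepRow (nanSetOf (Cx.getD i []))))
    (fun X i => X.modify i (keepRow (nanSetOf (Cx.getD i []))))
    (fun X i => X.modify i (keepRow (nanSetOf (Cx.getD i []))))
    (List.range Cx.length) Cx Cy Xp Yp]
  have comp : ∀ (L : List (List String)),
      (List.range Cx.length).foldl (fun X i => X.modify i (keepRow (nanSetOf (Cx.getD i [])))) L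
        = norm1 Cx L := by
    intro L
    rw [foldl_modify_nodup [] (fun i => keepRow (nanSetOf (Cx.getD i []))) _ List.nodup_range L]
    unfold norm1
    apply List.map_congr_left
    intro i _
    simp only [List.mem_range]
    rw [keepRow_eq_keepA]
  rw [comp Cx, comp Cy, comp Xp, comp Yp]

-- phase 2 of A: deleting the empty-row indices in descending order, in port shape
theorem phase2_eq (cx cy xc yc : List (List String)) :
    (List.range ((((List.range cx.length).filter (fun i => decide ((cx.getD i []).length = 0))).reverse).length)).foldl
      (fun (t : List (List String) × List (List String) × List (List String) × List (List String)) b =>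
        (t.1.eraseIdx ((((List.range cx.length).filter (fun i => decide ((cx.getD i []).length = 0))).reverse).getD b 0),
         t.2.1.eraseIdx ((((List.range cx.length).filter (fun i => decide ((cx.getD i []).length = 0))).reverse).getD b 0),
         t.2.2.1.eraseIdx ((((List.range cx.length).filter (fun i => decide ((cx.getD i []).length = 0))).reverse).getD b 0),
         t.2.2.2.eraseIdx ((((List.range cx.length).filter (fun i => decide ((cx.getD i []).length = 0))).reverse).getD b 0)))
      (cx, cy, xc, yc)
    = (fin2 cx cx, fin2 cx cy, fin2 cx xc, fin2 cx yc) := by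
  calc _ = ((((List.range cx.length).filter (fun i => decide ((cx.getD i []).length = 0))).reverse)).foldl
        (fun (t : List (List String) × List (List String) × List (List String) × List (List String)) i =>
          (t.1.eraseIdx i, t.2.1.eraseIdx i, t.2.2.1.eraseIdx i, t.2.2.2.eraseIdx i)) (cx, cy, xc, yc) :=
      foldl_range_getD1 _
        (fun t i => (t.1.eraseIdx i, t.2.1.eraseIdx i, t.2.2.1.eraseIdx i, t.2.2.2.eraseIdx i))
        (cx, cy, xc, yc)
    _ = (((((List.range cx.length).filter (fun i => decide ((cx.getD i []).length = 0))).reverse)).foldl (fun t i => t.eraseIdx i) cx,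
         ((((List.range cx.length).filter (fun i => decide ((cx.getD i []).length = 0))).reverse)).foldl (fun t i => t.eraseIdx i) cy,
         ((((List.range cx.length).filter (fun i => decide ((cx.getD i []).length = 0))).reverse)).foldl (fun t i => t.eraseIdx i) xc,
         ((((List.range cx.length).filter (fun i => decide ((cx.getD i []).length = 0))).reverse)).foldl (fun t i => t.eraseIdx i) yc) :=
      foldl_prod4 (fun t i => t.eraseIdx i) (fun t i => t.eraseIdx i) (fun t i => t.eraseIdx i)
        (fun t i => t.eraseIdx i)
        ((((List.range cx.length).filter (fun i => decide ((cx.getD i []).length = 0))).reverse)) cx cy xc yc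
    _ = _ := by
      unfold fin2
      rw [erase_desc [] cx cx.length (fun i => decide ((cx.getD i []).length = 0)),
          erase_desc [] cy cx.length (fun i => decide ((cx.getD i []).length = 0)),
          erase_desc [] xc cx.length (fun i => decide ((cx.getD i []).length = 0)),
          erase_desc [] yc cx.length (fun i => decide ((cx.getD i []).length = 0))]

-- phase 2 of B, in port shape
theorem alt_phase2_eq (cx cy xc yc : List (List String)) :
    (if PySem.Set.ofList ((List.range cx.length).filter (fun i => decide ((cx.getD i []).length = 0))) ≠ [] then
       (((List.range cx.length).filter (fun i => !PySem.Set.contains (PySem.Set.ofList ((List.range cx.length).filter (fun i => decide ((cx.getD i []).length = 0)))) i)).map (fun i => cx.getD i []),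
        ((List.range cy.length).filter (fun i => !PySem.Set.contains (PySem.Set.ofList ((List.range cx.length).filter (fun i => decide ((cx.getD i []).length = 0)))) i)).map (fun i => cy.getD i []),
        ((List.range xc.length).filter (fun i => !PySem.Set.contains (PySem.Set.ofList ((List.range cx.length).filter (fun i => decide ((cx.getD i []).length = 0)))) i)).map (fun i => xc.getD i []),
        ((List.range yc.length).filter (fun i => !PySem.Set.contains (PySem.Set.ofList ((List.range cx.length).filter (fun i => decide ((cx.getD i []).length = 0)))) i)).map (fun i => yc.getD i []))
     else (cx, cy, xc, yc))
    = (fin2 cx cx, fin2 cx cy, fin2 cx xc, fin2 cx yc) := by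
  by_cases h : PySem.Set.ofList ((List.range cx.length).filter (fun i => decide ((cx.getD i []).length = 0))) = []
  · rw [if_neg (not_not_intro h)]
    have hnone : ∀ i : Nat, i < cx.length → ¬ ((cx.getD i []).length = 0) := by
      intro i hi hlen
      have hrow : cx[i] = [] := by
        have h0 := List.length_eq_zero_iff.mp hlen
        rwa [List.getD_eq_getElem cx [] hi] at h0
      have hmem : i ∈ (List.range cx.length).filter (fun i => decide ((cx.getD i []).length = 0)) := by
        simp [List.mem_filter, List.mem_range, hi, hrow]
      have hmem2 : i ∈ PySem.Set.ofList ((List.range cx.length).filter (fun i => decide ((cx.getD i []).length = 0))) :=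
        (PySem.Set.mem_ofList _ _).mpr hmem
      rw [h] at hmem2
      simp at hmem2
    have comp : ∀ (L : List (List String)), fin2 cx L = L := by
      intro L
      unfold fin2
      have hall : ∀ i ∈ List.range L.length,
          (!(decide (i < cx.length) && decide ((cx.getD i []).length = 0))) = true := by
        intro i _
        by_cases hi : i < cx.length
        · have hne : ¬ cx[i] = [] := fun e =>
            hnone i hi (by rw [List.getD_eq_getElem cx [] hi, e]; rfl)
          simp [hi, hne]
        · simp [hi]
      rw [List.filter_eq_self.mpr hall]
      exact (eq_range_map_getD L []).symm
    rw [comp cx, comp cy, comp xc, comp yc]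
  · rw [if_pos h]
    have comp : ∀ (L : List (List String)),
        ((List.range L.length).filter (fun i => !PySem.Set.contains (PySem.Set.ofList ((List.range cx.length).filter (fun i => decide ((cx.getD i []).length = 0)))) i)).map (fun i => L.getD i [])
          = fin2 cx L := by
      intro L
      unfold fin2
      congr 1
      apply List.filter_congr
      intro j _
      rw [contains_ofList_filter_range]
    rw [comp cx, comp cy, comp xc, comp yc]

-- the two ports in fact agree on every input (Pre_ is not needed for the kernel proof)
theorem ports_eq (Cx Cy Xp Yp : List (List String)) :
    delete_NAN Cx Cy Xp Yp = delete_NAN_alt Cx Cy Xp Yp := by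
  unfold delete_NAN delete_NAN_alt
  rw [collect_eq Cx]
  simp only []
  rw [phase1_eq Cx Cy Xp Yp]
  simp only []
  rw [PySem.List.foldl_append_ite_eq_filter]
  simp only [List.nil_append]
  rw [phase2_eq (norm1 Cx Cx) (norm1 Cx Cy) (norm1 Cx Xp) (norm1 Cx Yp)]
  rw [alt_phase1_eq Cx Cy Xp Yp]
  simp only []
  rw [alt_phase2_eq (norm1 Cx Cx) (norm1 Cx Cy) (norm1 Cx Xp) (norm1 Cx Yp)]

-- ===== VERDICT (by name: the statement is the Claim_ definition above) =====
theorem delete_NAN_spec : Claim_equal_delete_NAN := by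
  intro Cx Cy Xp Yp _ _
  unfold Spec_delete_NAN
  exact ports_eq Cx Cy Xp Yp
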